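-- pv_equiv track=rewrite | github.com/leobloise/desafios_code_war | counting_duplicates/index.py | duplicate_count
-- ===== SOURCE A (Python) =====
-- def duplicate_count(text):
--
--     text = text.lower()
--
--     text_list = list(text)
--
--     counted = set()
--
--     for letter in text_list:
--
--         qtd = text_list.count(letter)
--
--         if qtd >= 2:
--             counted.add(letter)
--
--     return len(counted)
-- ===== SOURCE B (Python) =====
-- def duplicate_count(text):
--     chars = sorted(text.lower())
--     result = 0
--     prev = None
--     run = 0
--     for ch in chars:
--         if ch == prev:
--             run += 1
--         else:
--             if run >= 2:
--                 result += 1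
--             prev = ch
--             run = 1
--     if run >= 2:
--         result += 1
--     return result
-- ===== Notes on version B (the rewrite author's own statement) =====
-- stated objective: faster
-- what changed: Replaces A's per-character full-string .count scan plus a set of flagged letters by sorting the lowercased characters once and counting, in a single run-length pass, the groups of length >= 2.
import Mathlib
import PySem

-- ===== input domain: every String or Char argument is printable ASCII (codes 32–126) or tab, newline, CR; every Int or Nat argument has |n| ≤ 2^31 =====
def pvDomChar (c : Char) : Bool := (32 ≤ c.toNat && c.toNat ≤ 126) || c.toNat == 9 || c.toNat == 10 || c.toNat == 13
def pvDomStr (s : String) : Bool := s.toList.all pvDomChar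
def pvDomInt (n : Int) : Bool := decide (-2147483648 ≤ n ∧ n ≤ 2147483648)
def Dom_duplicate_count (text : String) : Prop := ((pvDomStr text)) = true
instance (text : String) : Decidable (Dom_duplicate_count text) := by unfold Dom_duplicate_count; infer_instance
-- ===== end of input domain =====

-- B sorts the lowercased characters once and counts runs of length ≥ 2 in one pass,
-- instead of A's full-string .count scan per character; return value proved equal on all inputs.


-- ===== PORT A =====
def duplicate_count (text : String) : Int :=
  let text := PySem.Str.lower text
  let text_list := text.toList
  let counted : PySem.Set Char :=
    text_list.foldl
      (fun (counted : PySem.Set Char) letter =>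
        let qtd : Int := (PySem.List.count text_list letter : Int)
        if 2 ≤ qtd then PySem.Set.add counted letter else counted)
      PySem.Set.empty
  PySem.Set.len counted

-- ===== PORT B =====
-- one pass over the sorted characters; state = (result, prev, run)
def duplicate_count_alt (text : String) : Int :=
  let chars := PySem.List.sorted (PySem.Str.lower text).toList (fun c => c)
  let st : Int × Option Char × Int :=
    chars.foldl
      (fun (st : Int × Option Char × Int) ch =>
        if some ch == st.2.1 then (st.1, st.2.1, st.2.2 + 1)
        else ((if 2 ≤ st.2.2 then st.1 + 1 else st.1), some ch, 1))
      (0, none, 0)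
  if 2 ≤ st.2.2 then st.1 + 1 else st.1

-- ===== PRECONDITION & SPEC =====
def Spec_duplicate_count (text : String) (out : Int) : Prop := out = duplicate_count_alt text
instance (text : String) (out : Int) : Decidable (Spec_duplicate_count text out) := by unfold Spec_duplicate_count; infer_instance

-- ===== CLAIM (what is proved, stated in full; the proofs are below) =====
def Claim_equal_duplicate_count : Prop := ∀ (text : String), Dom_duplicate_count text → Spec_duplicate_count text (duplicate_count text)

-- ===== LEMMAS AND PROOFS =====

-- the common value: number of distinct characters of L occurring at least twice
def dupCard (L : List Char) : Int :=
  ((L.toFinset.filter (fun c => 2 ≤ (L.count c : Int))).card : Int)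

-- A's loop step and B's loop step, named for the lemmas
def aStep (L : List Char) (s : PySem.Set Char) (letter : Char) : PySem.Set Char :=
  if 2 ≤ ((PySem.List.count L letter : Nat) : Int) then PySem.Set.add s letter else s

def bStep (st : Int × Option Char × Int) (ch : Char) : Int × Option Char × Int :=
  if some ch == st.2.1 then (st.1, st.2.1, st.2.2 + 1)
  else ((if 2 ≤ st.2.2 then st.1 + 1 else st.1), some ch, 1)

def bFlush (st : Int × Option Char × Int) : Int :=
  if 2 ≤ st.2.2 then st.1 + 1 else st.1

-- ===== A-side =====
lemma aFold_spec (L : List Char) : ∀ (xs : List Char) (s : PySem.Set Char), s.Nodup →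
    (xs.foldl (aStep L) s).Nodup ∧
    (∀ y, y ∈ xs.foldl (aStep L) s ↔ y ∈ s ∨ (y ∈ xs ∧ 2 ≤ ((L.count y : Nat) : Int))) := by
  intro xs
  induction xs with
  | nil => intro s hs; simpa using hs
  | cons x t ih =>
    intro s hs
    by_cases hx : 2 ≤ ((L.count x : Nat) : Int)
    · have hstep : aStep L s x = PySem.Set.add s x := by
        simp [aStep, PySem.List.count_eq, hx]
      have h := ih (PySem.Set.add s x) (PySem.Set.nodup_add s x hs)
      refine ⟨by simpa [hstep] using h.1, ?_⟩
      intro y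
      rw [List.foldl_cons, hstep, (h.2 y)]
      simp only [PySem.Set.mem_add, List.mem_cons]
      constructor
      · rintro ((hy | rfl) | ⟨hy, hc⟩)
        · exact Or.inl hy
        · exact Or.inr ⟨Or.inl rfl, hx⟩
        · exact Or.inr ⟨Or.inr hy, hc⟩
      · rintro (hy | ⟨(rfl | hy), hc⟩)
        · exact Or.inl (Or.inl hy)
        · exact Or.inl (Or.inr rfl)
        · exact Or.inr ⟨hy, hc⟩
    · have hstep : aStep L s x = s := by
        simp [aStep, PySem.List.count_eq, hx]
      have h := ih s hs
      refine ⟨by simpa [hstep] using h.1, ?_⟩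
      intro y
      rw [List.foldl_cons, hstep, (h.2 y)]
      simp only [List.mem_cons]
      constructor
      · rintro (hy | ⟨hy, hc⟩)
        · exact Or.inl hy
        · exact Or.inr ⟨Or.inr hy, hc⟩
      · rintro (hy | ⟨(rfl | hy), hc⟩)
        · exact Or.inl hy
        · exact (hx hc).elim
        · exact Or.inr ⟨hy, hc⟩

lemma a_eq_dupCard (L : List Char) :
    PySem.Set.len (L.foldl (aStep L) PySem.Set.empty) = dupCard L := by
  obtain ⟨hnd, hmem⟩ := aFold_spec L L PySem.Set.empty (by simp [PySem.Set.empty])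
  have hfin : (L.foldl (aStep L) PySem.Set.empty).toFinset
      = L.toFinset.filter (fun c => 2 ≤ ((L.count c : Nat) : Int)) := by
    ext y
    rw [List.mem_toFinset, Finset.mem_filter, hmem y]
    simp [PySem.Set.empty, List.mem_toFinset]
  have hlen : (L.foldl (aStep L) PySem.Set.empty).toFinset.card
      = (L.foldl (aStep L) PySem.Set.empty).length := List.toFinset_card_of_nodup hnd
  simp only [PySem.Set.len, dupCard, ← hlen, hfin]

-- ===== B-side =====
-- removing one distinct value x from L splits dupCard
lemma dupCard_decomp (M : List Char) (x : Char) (hx : x ∈ M) :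
    dupCard M = (if 2 ≤ ((M.count x : Nat) : Int) then 1 else 0)
      + dupCard (M.filter (fun y => y != x)) := by
  set N := M.filter (fun y => y != x) with hN
  have hcount : ∀ y : Char, y ≠ x → N.count y = M.count y := by
    intro y hy
    exact List.count_filter (by simp [hy])
  have hNT : N.toFinset = M.toFinset.erase x := by
    ext y
    simp [hN, Finset.mem_erase, and_comm]
  have hfilter : N.toFinset.filter (fun c => 2 ≤ ((N.count c : Nat) : Int))
      = (M.toFinset.filter (fun c => 2 ≤ ((M.count c : Nat) : Int))).erase x := by
    rw [hNT, ← Finset.filter_erase]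
    apply Finset.filter_congr
    intro y hy
    have hyx : y ≠ x := (Finset.mem_erase.mp hy).1
    simp [hcount y hyx]
  by_cases hpx : 2 ≤ ((M.count x : Nat) : Int)
  · have hxmem : x ∈ M.toFinset.filter (fun c => 2 ≤ ((M.count c : Nat) : Int)) :=
      Finset.mem_filter.mpr ⟨List.mem_toFinset.mpr hx, hpx⟩
    have hpos : 0 < (M.toFinset.filter (fun c => 2 ≤ ((M.count c : Nat) : Int))).card :=
      Finset.card_pos.mpr ⟨x, hxmem⟩
    rw [if_pos hpx]
    unfold dupCard
    rw [hfilter, Finset.card_erase_of_mem hxmem]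
    omega
  · have hxmem : x ∉ M.toFinset.filter (fun c => 2 ≤ ((M.count c : Nat) : Int)) :=
      fun h => hpx (Finset.mem_filter.mp h).2
    rw [if_neg hpx]
    unfold dupCard
    rw [hfilter, Finset.erase_eq_self.mpr hxmem]
    ring

-- the run-length pass over a sorted tail, with an open run of r ≥ 1 copies of c
lemma bFold_aux (T : List Char) : ∀ (c : Char) (res r : Int),
    T.Pairwise (· ≤ ·) → (∀ x ∈ T, c ≤ x) → 1 ≤ r →
    bFlush (T.foldl bStep (res, some c, r)) =
      res + (if 2 ≤ r + ((T.count c : Nat) : Int) then 1 else 0)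
          + dupCard (T.filter (fun y => y != c)) := by
  induction T with
  | nil =>
    intro c res r _ _ _
    simp only [List.foldl_nil, bFlush, List.count_nil, List.filter_nil]
    simp [dupCard]
    split_ifs <;> omega
  | cons x t ih =>
    intro c res r hp hc hr
    have hp' : t.Pairwise (· ≤ ·) := hp.of_cons
    have hxt : ∀ y ∈ t, x ≤ y := fun y hy => (List.pairwise_cons.mp hp).1 y hy
    by_cases hxc : x = c
    · subst hxc
      have hstep : bStep (res, some x, r) x = (res, some x, r + 1) := by
        simp [bStep]
      rw [List.foldl_cons, hstep, ih x res (r + 1) hp' hxt (by omega)]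
      have hcnt : ((x :: t).count x : Int) = (t.count x : Int) + 1 := by
        simp
      have hfil : (x :: t).filter (fun y => y != x) = t.filter (fun y => y != x) := by
        simp
      rw [hfil, hcnt]
      have : r + 1 + ((t.count x : Nat) : Int) = r + (((t.count x : Nat) : Int) + 1) := by ring
      rw [this]
    · have hcx : c < x := lt_of_le_of_ne (hc x (List.mem_cons_self)) (fun h => hxc h.symm)
      have hcnotmem : c ∉ (x :: t) := by
        intro hmem
        rcases List.mem_cons.mp hmem with h | h
        · exact hxc h.symm
        · exact absurd (lt_of_lt_of_le hcx (hxt c h)) (lt_irrefl c)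
      have hstep : bStep (res, some c, r) x
          = ((if 2 ≤ r then res + 1 else res), some x, 1) := by
        simp [bStep, fun h : x = c => hxc h]
      rw [List.foldl_cons, hstep,
        ih x (if 2 ≤ r then res + 1 else res) 1 hp' hxt (by omega)]
      have hcnt0 : (x :: t).count c = 0 := List.count_eq_zero.mpr hcnotmem
      have hfilc : (x :: t).filter (fun y => y != c) = x :: t := by
        rw [List.filter_eq_self]
        intro y hy
        simp only [bne_iff_ne, ne_eq]
        intro h; subst h; exact hcnotmem hy
      have hdec := dupCard_decomp (x :: t) x (List.mem_cons_self)
      have hxcnt : (((x :: t).count x : Nat) : Int) = 1 + ((t.count x : Nat) : Int) := by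
        simp; ring
      have hxfil : (x :: t).filter (fun y => y != x) = t.filter (fun y => y != x) := by
        simp
      rw [hfilc, hdec, hxcnt, hxfil, hcnt0]
      push_cast
      split_ifs <;> omega
  
lemma b_eq_dupCard (S : List Char) (hS : S.Pairwise (· ≤ ·)) :
    bFlush (S.foldl bStep (0, none, 0)) = dupCard S := by
  cases S with
  | nil => simp [bFlush, dupCard]
  | cons x t =>
    have hp' : t.Pairwise (· ≤ ·) := hS.of_cons
    have hxt : ∀ y ∈ t, x ≤ y := fun y hy => (List.pairwise_cons.mp hS).1 y hy
    have hstep : bStep (0, none, 0) x = (0, some x, 1) := by simp [bStep]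
    rw [List.foldl_cons, hstep, bFold_aux t x 0 1 hp' hxt (by omega)]
    have hdec := dupCard_decomp (x :: t) x (List.mem_cons_self)
    have hxcnt : (((x :: t).count x : Nat) : Int) = 1 + ((t.count x : Nat) : Int) := by
      simp; ring
    have hxfil : (x :: t).filter (fun y => y != x) = t.filter (fun y => y != x) := by
      simp
    rw [hdec, hxcnt, hxfil]
    ring

-- dupCard only depends on the multiset of characters
lemma dupCard_perm (L L' : List Char) (h : L.Perm L') : dupCard L = dupCard L' := by
  unfold dupCard
  rw [List.toFinset_eq_of_perm L L' h]
  have hfc : L'.toFinset.filter (fun c => 2 ≤ ((L.count c : Nat) : Int))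
      = L'.toFinset.filter (fun c => 2 ≤ ((L'.count c : Nat) : Int)) :=
    Finset.filter_congr (fun y _ => by rw [h.count_eq])
  rw [hfc]

-- ===== VERDICT (by name: the statement is the Claim_ definition above) =====
theorem duplicate_count_spec : Claim_equal_duplicate_count := by
  intro text _
  have ha : duplicate_count text
      = PySem.Set.len (((PySem.Str.lower text).toList).foldl
          (aStep ((PySem.Str.lower text).toList)) PySem.Set.empty) := rfl
  have hb : duplicate_count_alt text
      = bFlush ((PySem.List.sorted ((PySem.Str.lower text).toList) (fun c => c)).foldl
          bStep (0, none, 0)) := rfl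
  unfold Spec_duplicate_count
  rw [ha, hb, a_eq_dupCard,
    b_eq_dupCard _ (by simpa using PySem.List.sorted_pairwise ((PySem.Str.lower text).toList) (fun c => c)),
    dupCard_perm _ _ (PySem.List.sorted_perm ((PySem.Str.lower text).toList) (fun c => c) false)]
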